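-- pv_equiv track=rewrite | github.com/elic-eon/autoprover | evaluation/evaluation.py | split_coqtop_result
-- ===== SOURCE A (Python) =====
-- def split_coqtop_result(result, theorem_name):
--     """
--     split result into steps
--     """
--     total_steps = []
--     step = []
--     state = "begin"
--     spliter = theorem_name + " <"
--
--     for line in result.split("\n"):
--         line = line.strip()
--         if state == "begin":
--             if line.startswith(spliter):
--                 state = "start"
--                 step = [line]
--         else:
--             if line.startswith(spliter):
--                 total_steps.append(step)
--                 step = [line]
--             else:
--                 step.append(line)
--     total_steps.append(step)
--
--     return total_steps
-- ===== SOURCE B (Python) =====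
-- def split_coqtop_result(result, theorem_name):
--     """
--     split result into steps
--     """
--     spliter = theorem_name + " <"
--     lines = [l.strip() for l in result.split("\n")]
--     marks = [i for i, l in enumerate(lines) if l.startswith(spliter)]
--     if not marks:
--         return [[]]
--     bounds = marks + [len(lines)]
--     return [lines[a:b] for a, b in zip(bounds, bounds[1:])]
-- ===== Notes on version B (the rewrite author's own statement) =====
-- stated objective: alternative
-- what changed: Replaces the inline begin/start state machine with a precompute phase: strip all lines once, collect marker indices, then slice between consecutive markers (with a length sentinel), returning [[]] when no marker exists.
import Mathlib
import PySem

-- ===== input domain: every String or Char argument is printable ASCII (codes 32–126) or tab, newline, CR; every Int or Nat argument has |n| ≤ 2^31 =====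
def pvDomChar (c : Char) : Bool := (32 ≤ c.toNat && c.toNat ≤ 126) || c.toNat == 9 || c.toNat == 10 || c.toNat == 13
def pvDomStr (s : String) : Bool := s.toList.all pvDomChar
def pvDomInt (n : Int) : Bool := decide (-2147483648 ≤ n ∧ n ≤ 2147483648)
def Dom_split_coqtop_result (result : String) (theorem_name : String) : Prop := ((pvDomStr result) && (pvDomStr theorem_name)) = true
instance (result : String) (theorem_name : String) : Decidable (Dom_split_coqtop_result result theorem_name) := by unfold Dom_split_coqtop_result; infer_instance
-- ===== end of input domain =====

-- B replaces A's begin/start state machine by collecting marker indices once and slicing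
-- between consecutive markers; same return value (alternative decomposition, no speed claim).

-- ===== PORT A =====
def split_coqtop_result (result : String) (theorem_name : String) : List (List String) :=
  let spliter := theorem_name ++ " <"
  let fin := ((PySem.Str.split? result "\n").getD []).foldl
    (fun (acc : List (List String) × List String × String) rawline =>
      let line := PySem.Str.strip rawline
      if acc.2.2 = "begin" then
        if PySem.Str.startswith line spliter then (acc.1, [line], "start") else acc
      else
        if PySem.Str.startswith line spliter then (acc.1 ++ [acc.2.1], [line], acc.2.2)
        else (acc.1, acc.2.1 ++ [line], acc.2.2))
    ([], [], "begin")
  fin.1 ++ [fin.2.1]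

-- ===== PORT B =====
def split_coqtop_result_alt (result : String) (theorem_name : String) : List (List String) :=
  let spliter := theorem_name ++ " <"
  let lines := ((PySem.Str.split? result "\n").getD []).map PySem.Str.strip
  let marks := ((PySem.List.enumerate lines).filter
      (fun q => PySem.Str.startswith q.2 spliter)).map (·.1)
  if marks = [] then [[]]
  else
    let bounds := marks ++ [(lines.length : Int)]
    (bounds.zip bounds.tail).map (fun q => PySem.List.slice lines (some q.1) (some q.2))

-- ===== PRECONDITION & SPEC =====
def Spec_split_coqtop_result (result : String) (theorem_name : String) (out : List (List String)) : Prop := out = split_coqtop_result_alt result theorem_name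
instance (result : String) (theorem_name : String) (out : List (List String)) : Decidable (Spec_split_coqtop_result result theorem_name out) := by unfold Spec_split_coqtop_result; infer_instance

-- ===== CLAIM (what is proved, stated in full; the proofs are below) =====
def Claim_equal_split_coqtop_result : Prop := ∀ (result : String) (theorem_name : String), Dom_split_coqtop_result result theorem_name → Spec_split_coqtop_result result theorem_name (split_coqtop_result result theorem_name)

-- ===== LEMMAS AND PROOFS =====

def pvMarks (p : String → Bool) : List String → List Nat
  | [] => []
  | x :: xs => if p x then 0 :: (pvMarks p xs).map (· + 1) else (pvMarks p xs).map (· + 1)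
def pvChunks (p : String → Bool) (l : List String) : List (List String) :=
  let bounds := pvMarks p l ++ [l.length]
  (bounds.zip bounds.tail).map (fun q => (l.drop q.1).take (q.2 - q.1))
theorem pv_shift (bs : List Nat) (x : String) (l : List String) :
    (((bs.map (· + 1)).zip ((bs.map (· + 1)).tail)).map
        (fun q => ((x :: l).drop q.1).take (q.2 - q.1)))
      = ((bs.zip bs.tail).map (fun q => (l.drop q.1).take (q.2 - q.1))) := by
  rw [← List.map_tail, List.zip_map, List.map_map]
  refine List.map_congr_left ?_
  intro q hq
  simp [Prod.map, List.drop_succ_cons, Nat.succ_sub_succ]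

theorem pv_chunks_cons_neg (p : String → Bool) (x : String) (xs : List String)
    (h : p x = false) : pvChunks p (x :: xs) = pvChunks p xs := by
  have hb : pvMarks p (x :: xs) ++ [(x :: xs).length]
      = ((pvMarks p xs) ++ [xs.length]).map (· + 1) := by
    simp [pvMarks, h]
  simp only [pvChunks, hb]
  exact pv_shift _ x xs

theorem pv_chunks_cons_pos (p : String → Bool) (x : String) (xs : List String)
    (h : p x = true) :
    pvChunks p (x :: xs)
      = (match pvMarks p xs with
         | [] => [x :: xs]
         | m :: _ => (x :: xs.take m) :: pvChunks p xs) := by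
  have hb : pvMarks p (x :: xs) ++ [(x :: xs).length]
      = 0 :: ((pvMarks p xs) ++ [xs.length]).map (· + 1) := by
    simp [pvMarks, h]
  cases hm : pvMarks p xs with
  | nil =>
    simp only [pvChunks, hb, hm]
    simp
  | cons m ms =>
    simp only [pvChunks, hb, hm]
    have := pv_shift (m :: ms ++ [xs.length]) x xs
    simp only [List.cons_append, List.map_cons, List.tail_cons, List.zip_cons_cons,
      List.map_cons, List.drop_zero] at this ⊢
    rw [this]
    simp [List.take_succ_cons]
def pvGroups (p : String → Bool) : List String → List String → List (List String)
  | [], step => [step]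
  | x :: xs, step => if p x then step :: pvGroups p xs [x] else pvGroups p xs (step ++ [x])
def pvBegin (p : String → Bool) : List String → List (List String)
  | [] => [[]]
  | x :: xs => if p x then pvGroups p xs [x] else pvBegin p xs

theorem pv_groups_eq (p : String → Bool) (xs : List String) :
    ∀ step, pvGroups p xs step
      = (match pvMarks p xs with
         | [] => [step ++ xs]
         | m :: _ => (step ++ xs.take m) :: pvChunks p xs) := by
  induction xs with
  | nil => intro step; simp [pvGroups, pvMarks]
  | cons x xs ih =>
    intro step
    by_cases h : p x
    · simp only [pvGroups, h, if_true, ih [x], pvMarks, pv_chunks_cons_pos p x xs h]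
      cases hm : pvMarks p xs <;> simp [hm]
    · have h' : p x = false := by simpa using h
      simp only [pvGroups, h', Bool.false_eq_true, if_false, ih (step ++ [x]),
        pvMarks, pv_chunks_cons_neg p x xs h']
      cases hm : pvMarks p xs <;> simp [hm, List.take_succ_cons]

theorem pv_begin_eq (p : String → Bool) (l : List String) :
    pvBegin p l = if pvMarks p l = [] then [[]] else pvChunks p l := by
  induction l with
  | nil => simp [pvBegin, pvMarks]
  | cons x xs ih =>
    by_cases h : p x
    · simp only [pvBegin, h, if_true, pv_groups_eq p xs [x], pvMarks,
        pv_chunks_cons_pos p x xs h]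
      cases hm : pvMarks p xs <;> simp [hm]
    · have h' : p x = false := by simpa using h
      simp only [pvBegin, h', Bool.false_eq_true, if_false, ih, pvMarks,
        pv_chunks_cons_neg p x xs h']
      cases hm : pvMarks p xs <;> simp [hm]
def pvStep (p : String → Bool) (acc : List (List String) × List String × String)
    (line : String) : List (List String) × List String × String :=
  if acc.2.2 = "begin" then
    if p line then (acc.1, [line], "start") else acc
  else
    if p line then (acc.1 ++ [acc.2.1], [line], acc.2.2)
    else (acc.1, acc.2.1 ++ [line], acc.2.2)

theorem pv_fold_start (p : String → Bool) (xs : List String) :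
    ∀ total step,
      (xs.foldl (pvStep p) (total, step, "start")).1
          ++ [(xs.foldl (pvStep p) (total, step, "start")).2.1]
        = total ++ pvGroups p xs step := by
  induction xs with
  | nil => intro total step; simp [pvGroups]
  | cons x xs ih =>
    intro total step
    have hne : ¬ (("start" : String) = "begin") := by decide
    by_cases h : p x
    · simp only [List.foldl_cons, pvStep, hne, if_false, h, if_true, ih, pvGroups]
      simp
    · simp only [List.foldl_cons, pvStep, hne, if_false, h, Bool.false_eq_true, ih,
        pvGroups]

theorem pv_fold_begin (p : String → Bool) (xs : List String) :
    (xs.foldl (pvStep p) ([], [], "begin")).1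
        ++ [(xs.foldl (pvStep p) ([], [], "begin")).2.1]
      = pvBegin p xs := by
  induction xs with
  | nil => simp [pvBegin]
  | cons x xs ih =>
    by_cases h : p x
    · simp only [List.foldl_cons, pvStep, h, if_true, pvBegin]
      simpa using pv_fold_start p xs [] [x]
    · simp only [List.foldl_cons, pvStep, h, Bool.false_eq_true, if_false, pvBegin]
      simpa [h] using ih


theorem pv_enum_marks (p : String → Bool) (l : List String) :
    ∀ s : Int,
      ((PySem.List.enumerate l s).filter (fun q => p q.2)).map (·.1)
        = (pvMarks p l).map (fun k => s + (k : Nat)) := by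
  induction l with
  | nil => intro s; simp [PySem.List.enumerate_nil, pvMarks]
  | cons x xs ih =>
    intro s
    by_cases h : p x
    · simp only [PySem.List.enumerate_cons, List.filter_cons, h, if_true, pvMarks,
        List.map_cons, ih (s + 1), List.map_map]
      simp only [Int.natCast_zero, add_zero, List.cons.injEq, true_and]
      refine List.map_congr_left ?_
      intro k _
      simp only [Function.comp_apply]
      push_cast
      ring
    · simp only [PySem.List.enumerate_cons, List.filter_cons, h, Bool.false_eq_true,
        if_false, pvMarks, ih (s + 1), List.map_map]
      refine List.map_congr_left ?_
      intro k _
      simp only [Function.comp_apply]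
      push_cast
      ring

-- ===== VERDICT (by name: the statement is the Claim_ definition above) =====
theorem split_coqtop_result_spec : Claim_equal_split_coqtop_result := by
  intro result theorem_name _
  simp only [Spec_split_coqtop_result, split_coqtop_result, split_coqtop_result_alt]
  set sp := theorem_name ++ " <" with hsp
  set p : String → Bool := fun l => PySem.Str.startswith l sp with hp
  set raw := (PySem.Str.split? result "\n").getD [] with hraw
  set lines := raw.map PySem.Str.strip with hlines
  have hA : raw.foldl
      (fun (acc : List (List String) × List String × String) rawline =>
        let line := PySem.Str.strip rawline
        if acc.2.2 = "begin" then
          if PySem.Str.startswith line sp then (acc.1, [line], "start") else acc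
        else
          if PySem.Str.startswith line sp then (acc.1 ++ [acc.2.1], [line], acc.2.2)
          else (acc.1, acc.2.1 ++ [line], acc.2.2))
      ([], [], "begin")
    = lines.foldl (pvStep p) ([], [], "begin") := by
    rw [hlines, List.foldl_map]
    rfl
  rw [hA, pv_fold_begin p lines, pv_begin_eq p lines]
  have hmarks : ((PySem.List.enumerate lines).filter (fun q => p q.2)).map (·.1)
      = (pvMarks p lines).map (fun k => ((k : Nat) : Int)) := by
    simpa using pv_enum_marks p lines 0
  rw [hmarks]
  by_cases hm : pvMarks p lines = []
  · simp [hm]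
  · rw [if_neg hm, if_neg (by simpa using hm)]
    have hb : (pvMarks p lines).map (fun k => ((k : Nat) : Int)) ++ [(lines.length : Int)]
        = ((pvMarks p lines) ++ [lines.length]).map (fun k => ((k : Nat) : Int)) := by
      simp
    rw [hb, ← List.map_tail, List.zip_map, List.map_map]
    unfold pvChunks
    refine (List.map_congr_left ?_).symm
    intro q hq
    simp only [Function.comp_apply, Prod.map]
    rw [PySem.List.slice_natCast]
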